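-- pv_equiv track=rewrite | github.com/timstewart-dynatrace/Python-IAM-CLI | src/dtiam/commands/raci.py | check_permission_match
-- ===== SOURCE A (Python) =====
-- def check_permission_match(group_permissions: set[str], required: list[str]) -> bool:
--     """Check if a group has any of the required permissions.
--
--     Args:
--         group_permissions: Set of permissions the group has
--         required: List of required permissions
--
--     Returns:
--         True if any required permission is present
--     """
--     for req in required:
--         # Exact match
--         if req in group_permissions:
--             return True
--         # Wildcard match (e.g., "settings:*" matches "settings:objects:read")
--         for perm in group_permissions:
--             if "*" in req:
--                 base = req.replace("*", "")
--                 if perm.startswith(base):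
--                     return True
--             if "*" in perm:
--                 base = perm.replace("*", "")
--                 if req.startswith(base):
--                     return True
--     return False
-- ===== SOURCE B (Python) =====
-- def _sweep(bases, strings):
--     """bases and strings sorted ascending: is some base a prefix of some string?
--
--     Strings sharing prefix b form a contiguous block starting at the first
--     string >= b, so one forward pointer over `strings` serves all bases."""
--     i = 0
--     for b in bases:
--         while i < len(strings) and strings[i] < b:
--             i += 1
--         if i < len(strings) and strings[i].startswith(b):
--             return True
--     return False
--
--
-- def check_permission_match(group_permissions, required):
--     """Check if a group has any of the required permissions (exact or wildcard),
--     by sorting and doing two linear prefix sweeps instead of the pairwise scan."""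
--     if any(req in group_permissions for req in required):
--         return True
--     req_bases = sorted(r.replace("*", "") for r in required if "*" in r)
--     perm_bases = sorted(p.replace("*", "") for p in group_permissions if "*" in p)
--     perms_sorted = sorted(group_permissions)
--     reqs_sorted = sorted(required)
--     return _sweep(req_bases, perms_sorted) or _sweep(perm_bases, reqs_sorted)
-- ===== Notes on version B (the rewrite author's own statement) =====
-- stated objective: alternative
-- what changed: B replaces A's nested pairwise wildcard scan with a sort-then-sweep algorithm: it sorts the wildcard bases and the candidate strings and runs a single forward two-pointer sweep per direction, exploiting that all strings sharing a prefix are contiguous in sorted order, so each base is tested against one string instead of all of them.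
import Mathlib
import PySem

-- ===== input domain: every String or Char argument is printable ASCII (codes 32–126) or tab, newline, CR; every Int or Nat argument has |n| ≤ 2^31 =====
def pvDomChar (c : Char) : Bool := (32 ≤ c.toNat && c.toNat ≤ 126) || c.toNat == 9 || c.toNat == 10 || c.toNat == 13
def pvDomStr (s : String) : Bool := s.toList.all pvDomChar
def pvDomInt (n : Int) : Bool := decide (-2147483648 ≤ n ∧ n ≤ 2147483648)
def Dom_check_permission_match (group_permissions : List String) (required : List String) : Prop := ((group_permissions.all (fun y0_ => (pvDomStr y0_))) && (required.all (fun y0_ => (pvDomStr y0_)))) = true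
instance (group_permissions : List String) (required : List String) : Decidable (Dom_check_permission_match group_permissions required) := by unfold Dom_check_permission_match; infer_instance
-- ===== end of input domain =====

-- B replaces A's nested pairwise wildcard scan with a sort-then-sweep algorithm (alternative, different traversal); return value only, no mutation.


-- ===== PORT A =====
-- inner loop of A: 'for perm in group_permissions: …' for one req
def cpmInner (req : String) : List String → Bool
  | [] => false
  | perm :: rest =>
    if PySem.Str.isIn "*" req && PySem.Str.startswith perm (PySem.Str.replace req "*" "") then true
    else if PySem.Str.isIn "*" perm && PySem.Str.startswith req (PySem.Str.replace perm "*" "") then true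
    else cpmInner req rest

def check_permission_match (group_permissions : List String) (required : List String) : Bool :=
  match required with
  | [] => false
  | req :: rest =>
    if group_permissions.contains req then true
    else if cpmInner req group_permissions then true
    else check_permission_match group_permissions rest

-- ===== PORT B =====
-- 'while i < len(strings) and strings[i] < b: i += 1' — the remaining suffix of strings replaces the index i
-- (Python's 's < b' on ASCII strings is exactly Lean's lexicographic '<' on String)
def pvDropLt (b : String) : List String → List String
  | [] => []
  | s :: rest => if s < b then pvDropLt b rest else s :: rest

-- 'for b in bases: … if i < len(strings) and strings[i].startswith(b): return True' of _sweep
def pvSweep : List String → List String → Bool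
  | [], _ => false
  | b :: bs, strs =>
    match pvDropLt b strs with
    | [] => pvSweep bs []
    | s :: rest => if PySem.Str.startswith s b then true else pvSweep bs (s :: rest)

def check_permission_match_alt (group_permissions : List String) (required : List String) : Bool :=
  if required.any (fun req => group_permissions.contains req) then true
  else
    let req_bases := PySem.List.sorted ((required.filter (fun r => PySem.Str.isIn "*" r)).map (fun r => PySem.Str.replace r "*" "")) (fun x => x) false
    let perm_bases := PySem.List.sorted ((group_permissions.filter (fun p => PySem.Str.isIn "*" p)).map (fun p => PySem.Str.replace p "*" "")) (fun x => x) false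
    let perms_sorted := PySem.List.sorted group_permissions (fun x => x) false
    let reqs_sorted := PySem.List.sorted required (fun x => x) false
    pvSweep req_bases perms_sorted || pvSweep perm_bases reqs_sorted

-- ===== PRECONDITION & SPEC =====
def Spec_check_permission_match (group_permissions : List String) (required : List String) (out : Bool) : Prop := out = check_permission_match_alt group_permissions required
instance (group_permissions : List String) (required : List String) (out : Bool) : Decidable (Spec_check_permission_match group_permissions required out) := by unfold Spec_check_permission_match; infer_instance

-- ===== CLAIM (what is proved, stated in full; the proofs are below) =====
def Claim_equal_check_permission_match : Prop := ∀ (group_permissions : List String) (required : List String), Dom_check_permission_match group_permissions required → Spec_check_permission_match group_permissions required (check_permission_match group_permissions required)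

-- ===== LEMMAS AND PROOFS =====

-- a prefix is ≤ the string it prefixes (lexicographic order on List Char)
theorem pvPrefix_not_lt (b s : List Char) (h : b <+: s) : ¬ s < b := by
  induction b generalizing s with
  | nil => exact List.not_lt_nil s
  | cons c bt ih =>
    match s with
    | [] => simp at h
    | d :: st =>
      obtain ⟨hcd, hbt⟩ := List.cons_prefix_cons.mp h
      subst hcd
      intro hlt
      rcases List.cons_lt_cons_iff.mp hlt with h1 | ⟨_, h2⟩
      · exact lt_irrefl _ h1
      · exact ih st hbt h2

-- strings with prefix b are an initial block of {s ≥ b}: b ≤ s ≤ s' and b prefix of s' → b prefix of s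
theorem pvBetween (b s s' : List Char) (h1 : ¬ s < b) (h2 : ¬ s' < s) (h3 : b <+: s') : b <+: s := by
  induction b generalizing s s' with
  | nil => exact List.nil_prefix
  | cons c bt ih =>
    match s with
    | [] => exact absurd (List.nil_lt_cons c bt) h1
    | d :: st =>
      match s' with
      | [] => simp at h3
      | e :: st' =>
        obtain ⟨hce, hbt⟩ := List.cons_prefix_cons.mp h3
        subst hce
        have hdc : ¬ d < c := fun hh => h1 (List.cons_lt_cons_iff.mpr (Or.inl hh))
        have hcd : ¬ c < d := fun hh => h2 (List.cons_lt_cons_iff.mpr (Or.inl hh))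
        have hdc' : d = c := le_antisymm (not_lt.mp hcd) (not_lt.mp hdc)
        subst hdc'
        have h1' : ¬ st < bt := fun hh => h1 (List.cons_lt_cons_iff.mpr (Or.inr ⟨rfl, hh⟩))
        have h2' : ¬ st' < st := fun hh => h2 (List.cons_lt_cons_iff.mpr (Or.inr ⟨rfl, hh⟩))
        exact List.cons_prefix_cons.mpr ⟨rfl, ih st st' h1' h2' hbt⟩

theorem pvStartswith_iff (s p : String) : PySem.Str.startswith s p = true ↔ p.toList <+: s.toList := by
  rw [PySem.Str.startswith_eq]; exact PySem.Chars.startswith_iff _ _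

theorem pvStartswith_not_lt (s p : String) (h : PySem.Str.startswith s p = true) : ¬ s < p := by
  have := pvPrefix_not_lt _ _ ((pvStartswith_iff s p).mp h)
  intro hh; exact this (String.lt_iff_toList_lt.mp hh)

-- dropping the strings < b loses no string with prefix b' for any b' ≥ b
theorem pvDropLt_any (b b' : String) (hbb : b ≤ b') (strs : List String) :
    (pvDropLt b strs).any (fun s => PySem.Str.startswith s b') =
      strs.any (fun s => PySem.Str.startswith s b') := by
  induction strs with
  | nil => rfl
  | cons s rest ih =>
    by_cases hs : s < b
    · have hsw : PySem.Str.startswith s b' = false := by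
        cases hw : PySem.Str.startswith s b' with
        | false => rfl
        | true => exact absurd (hs.trans_le hbb) (pvStartswith_not_lt s b' hw)
      rw [pvDropLt, if_pos hs, ih, List.any_cons, hsw, Bool.false_or]
    · rw [pvDropLt, if_neg hs]

-- pvDropLt returns a suffix of its input
theorem pvDropLt_suffix (b : String) (strs : List String) : (pvDropLt b strs) <:+ strs := by
  induction strs with
  | nil => exact List.suffix_rfl
  | cons s rest ih =>
    by_cases hs : s < b
    · rw [pvDropLt, if_pos hs]; exact ih.trans (List.suffix_cons s rest)
    · rw [pvDropLt, if_neg hs]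

-- the head after dropping is not < b
theorem pvDropLt_head (b s : String) (rest strs : List String)
    (h : pvDropLt b strs = s :: rest) : ¬ s < b := by
  induction strs with
  | nil => simp [pvDropLt] at h
  | cons t ts ih =>
    by_cases ht : t < b
    · exact ih (by simpa [pvDropLt, ht] using h)
    · rw [pvDropLt, if_neg ht] at h
      cases h; exact ht

-- if the sorted suffix's head does not start with b, no element of it does
theorem pvHead_decides (b s : String) (rest : List String)
    (hp : (s :: rest).Pairwise (fun a c => a ≤ c)) (hgb : ¬ s < b)
    (hsw : PySem.Str.startswith s b = false) :
    (s :: rest).any (fun t => PySem.Str.startswith t b) = false := by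
  rw [List.any_eq_false]
  intro t ht hw
  rcases List.mem_cons.mp ht with rfl | htr
  · rw [hw] at hsw; exact Bool.noConfusion hsw
  · have hst : s ≤ t := (List.pairwise_cons.mp hp).1 t htr
    have hpre : b.toList <+: s.toList :=
      pvBetween b.toList s.toList t.toList
        (fun hh => hgb (String.lt_iff_toList_lt.mpr hh))
        (fun hh => absurd (String.lt_iff_toList_lt.mpr hh) (not_lt.mpr hst))
        ((pvStartswith_iff t b).mp hw)
    rw [(pvStartswith_iff s b).mpr hpre] at hsw; exact Bool.noConfusion hsw

-- correctness of the sweep on sorted inputs: it decides the prefix-pair existential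
theorem pvSweep_eq (bases strs : List String)
    (hb : bases.Pairwise (fun a c => a ≤ c)) (hs : strs.Pairwise (fun a c => a ≤ c)) :
    pvSweep bases strs = bases.any (fun b => strs.any (fun s => PySem.Str.startswith s b)) := by
  induction bases generalizing strs with
  | nil => simp [pvSweep]
  | cons b bs ih =>
    obtain ⟨hble, hbs⟩ := List.pairwise_cons.mp hb
    have hs' : (pvDropLt b strs).Pairwise (fun a c => a ≤ c) :=
      hs.sublist (pvDropLt_suffix b strs).sublist
    have hrest : ∀ b' ∈ bs, (pvDropLt b strs).any (fun s => PySem.Str.startswith s b') =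
        strs.any (fun s => PySem.Str.startswith s b') :=
      fun b' hb' => pvDropLt_any b b' (hble b' hb') strs
    rw [List.any_cons, ← pvDropLt_any b b le_rfl strs]
    cases hd : pvDropLt b strs with
    | nil =>
      simp only [pvSweep, hd]
      rw [ih [] hbs List.Pairwise.nil, List.any_nil, Bool.false_or]
      exact PySem.List.any_congr_mem (fun b' hb' => by
        rw [List.any_nil, ← hrest b' hb', hd, List.any_nil])
    | cons s rest =>
      simp only [pvSweep, hd]
      cases hsw : PySem.Str.startswith s b with
      | true =>
        rw [if_pos rfl, List.any_cons, hsw, Bool.true_or, Bool.true_or]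
      | false =>
        have hhead := pvHead_decides b s rest (hd ▸ hs') (pvDropLt_head b s rest strs hd) hsw
        rw [if_neg (by decide), ih (s :: rest) hbs (hd ▸ hs'),
          hhead, Bool.false_or]
        exact PySem.List.any_congr_mem (fun b' hb' => by rw [← hrest b' hb', hd])

-- A's inner loop over the permissions equals two flat 'any' scans
theorem cpmInner_eq (req : String) (gp : List String) :
    cpmInner req gp =
      ((PySem.Str.isIn "*" req &&
          gp.any (fun p => PySem.Str.startswith p (PySem.Str.replace req "*" ""))) ||
        gp.any (fun p =>
          PySem.Str.isIn "*" p && PySem.Str.startswith req (PySem.Str.replace p "*" ""))) := by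
  induction gp with
  | nil => simp [cpmInner]
  | cons p rest ih =>
    simp only [cpmInner, List.any_cons, ih]
    cases PySem.Str.isIn "*" req <;>
      cases PySem.Str.isIn "*" p <;>
      cases PySem.Str.startswith p (PySem.Str.replace req "*" "") <;>
      cases PySem.Str.startswith req (PySem.Str.replace p "*" "") <;> simp

-- A as one flat any over the required list
theorem pvA_eq_any (gp required : List String) :
    check_permission_match gp required =
      required.any (fun req =>
        gp.contains req ||
        ((PySem.Str.isIn "*" req &&
            gp.any (fun p => PySem.Str.startswith p (PySem.Str.replace req "*" ""))) ||
          gp.any (fun p =>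
            PySem.Str.isIn "*" p && PySem.Str.startswith req (PySem.Str.replace p "*" "")))) := by
  induction required with
  | nil => simp [check_permission_match]
  | cons req rest ih =>
    rw [List.any_cons, ← ih, check_permission_match, cpmInner_eq]
    cases hc : gp.contains req <;>
      cases h1 : (PySem.Str.isIn "*" req &&
        gp.any (fun p => PySem.Str.startswith p (PySem.Str.replace req "*" ""))) <;>
      cases h2 : gp.any (fun p =>
        PySem.Str.isIn "*" p && PySem.Str.startswith req (PySem.Str.replace p "*" "")) <;>
      simp

-- any over a sorted copy equals any over the original list
theorem pvAny_sorted (xs : List String) (f : String → Bool) :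
    (PySem.List.sorted xs (fun x => x) false).any f = xs.any f :=
  (PySem.List.sorted_perm xs (fun x => x) false).any_eq

-- the sweep of the sorted base table against the sorted strings = the pairwise existential
theorem pvSweep_sorted_eq (src strs : List String) (wild : String → Bool) (strip : String → String) :
    pvSweep (PySem.List.sorted ((src.filter wild).map strip) (fun x => x) false)
        (PySem.List.sorted strs (fun x => x) false) =
      src.any (fun x => wild x && strs.any (fun s => PySem.Str.startswith s (strip x))) := by
  rw [pvSweep_eq _ _ (PySem.List.sorted_pairwise _ _) (PySem.List.sorted_pairwise _ _),
    pvAny_sorted]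
  have h1 : ∀ b, (PySem.List.sorted strs (fun x => x) false).any
      (fun s => PySem.Str.startswith s b) = strs.any (fun s => PySem.Str.startswith s b) :=
    fun b => pvAny_sorted strs _
  rw [PySem.List.any_congr_mem (fun b _ => h1 b)]
  rw [List.any_map, List.any_filter]
  simp only [Function.comp_apply]

-- A = B on every input (both are total; no precondition)
theorem pvCpm_eq (gp required : List String) :
    check_permission_match gp required = check_permission_match_alt gp required := by
  rw [pvA_eq_any, check_permission_match_alt]
  by_cases hex : required.any (fun req => gp.contains req) = true
  · rw [if_pos hex]
    rw [List.any_eq_true] at hex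
    obtain ⟨req, hreq, hc⟩ := hex
    rw [List.any_eq_true]
    exact ⟨req, hreq, by rw [hc, Bool.true_or]⟩
  · rw [if_neg hex]
    simp only [pvSweep_sorted_eq]
    rw [Bool.not_eq_true, List.any_eq_false] at hex
    rw [Bool.eq_iff_iff]
    simp only [List.any_eq_true, Bool.or_eq_true, Bool.and_eq_true]
    constructor
    · rintro ⟨req, hreq, hc | ⟨ha, hb⟩ | ⟨p, hp, ha, hb⟩⟩
      · exact absurd hc (hex req hreq)
      · exact Or.inl ⟨req, hreq, ha, hb⟩
      · exact Or.inr ⟨p, hp, ha, req, hreq, hb⟩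
    · rintro (⟨req, hreq, ha, hb⟩ | ⟨p, hp, ha, req, hreq, hb⟩)
      · exact ⟨req, hreq, Or.inr (Or.inl ⟨ha, hb⟩)⟩
      · exact ⟨req, hreq, Or.inr (Or.inr ⟨p, hp, ha, hb⟩)⟩

-- ===== VERDICT (by name: the statement is the Claim_ definition above) =====
theorem check_permission_match_spec : Claim_equal_check_permission_match := by
  intro gp required _
  unfold Spec_check_permission_match
  exact pvCpm_eq gp required
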